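-- pv_equiv track=rewrite | github.com/Genroh/Mahjong | hantei.py | chanta
-- ===== SOURCE A (Python) =====
-- def chanta(lst):
--     chanta = 2   # [純チャン, チャンタ]
--     for p in lst:
--         if abs(p[0]) % 10 not in [1, 9] and abs(p[-1]) % 10 not in [1, 9]:
--             chanta = 1
--             if abs(p[0])//10 != 4 and abs(p[-1])//10 != 4:
--                 return 0
--     return chanta
-- ===== SOURCE B (Python) =====
-- def chanta(lst):
--     def _has_terminal(p):
--         return abs(p[0]) % 10 in (1, 9) or abs(p[-1]) % 10 in (1, 9)
--
--     def _has_honor(p):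
--         return abs(p[0]) // 10 == 4 or abs(p[-1]) // 10 == 4
--
--     if any(not _has_terminal(p) and not _has_honor(p) for p in lst):
--         return 0
--     return 2 if all(_has_terminal(p) for p in lst) else 1
-- ===== Notes on version B (the rewrite author's own statement) =====
-- stated objective: simpler
-- what changed: Replaced the early-exit accumulator loop by two per-group predicates (has_terminal / has_honor) and an any/all classification: return 0 if some group has neither, else 2 iff every group has a terminal end.
import Mathlib
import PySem

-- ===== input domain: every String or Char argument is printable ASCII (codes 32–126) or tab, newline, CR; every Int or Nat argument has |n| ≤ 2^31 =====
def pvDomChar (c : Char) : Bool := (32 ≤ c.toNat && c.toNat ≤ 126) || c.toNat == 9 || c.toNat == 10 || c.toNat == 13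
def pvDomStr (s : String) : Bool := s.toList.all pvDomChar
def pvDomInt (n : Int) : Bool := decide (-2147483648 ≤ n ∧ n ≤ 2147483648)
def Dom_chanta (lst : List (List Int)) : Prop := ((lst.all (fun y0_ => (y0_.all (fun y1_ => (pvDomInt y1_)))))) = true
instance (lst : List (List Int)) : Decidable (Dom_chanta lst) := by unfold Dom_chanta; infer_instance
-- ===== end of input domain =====

-- B is a simpler decomposition of A: two per-group predicates plus an any/all classification.

-- ===== PORT A =====
-- the for-loop with its early 'return 0' and the mutable accumulator 'chanta'
def chanta_loop : List (List Int) → Int → Int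
  | [], c => c
  | p :: rest, c =>
    match PySem.List.pyGet? p 0, PySem.List.pyGet? p (-1) with
    | some h, some l =>
      if !(PySem.Int.mod |h| 10 == 1 || PySem.Int.mod |h| 10 == 9) &&
         !(PySem.Int.mod |l| 10 == 1 || PySem.Int.mod |l| 10 == 9) then
        if PySem.Int.floordiv |h| 10 != 4 && PySem.Int.floordiv |l| 10 != 4 then 0
        else chanta_loop rest 1
      else chanta_loop rest c
    | _, _ => 0  -- IndexError on an empty group: excluded by Pre_chanta

def chanta (lst : List (List Int)) : Int := chanta_loop lst 2

-- ===== PORT B =====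
def hasTerminal (p : List Int) : Bool :=
  match PySem.List.pyGet? p 0, PySem.List.pyGet? p (-1) with
  | some h, some l =>
      (PySem.Int.mod |h| 10 == 1 || PySem.Int.mod |h| 10 == 9) ||
      (PySem.Int.mod |l| 10 == 1 || PySem.Int.mod |l| 10 == 9)
  | _, _ => false  -- IndexError on an empty group: excluded by Pre_chanta

def hasHonor (p : List Int) : Bool :=
  match PySem.List.pyGet? p 0, PySem.List.pyGet? p (-1) with
  | some h, some l =>
      PySem.Int.floordiv |h| 10 == 4 || PySem.Int.floordiv |l| 10 == 4
  | _, _ => false  -- IndexError on an empty group: excluded by Pre_chanta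

def chanta_alt (lst : List (List Int)) : Int :=
  if lst.any (fun p => !hasTerminal p && !hasHonor p) then 0
  else if lst.all hasTerminal then 2 else 1

-- ===== PRECONDITION & SPEC =====
-- Pre_ excludes exactly the inputs on which A raises IndexError: those where an empty
-- group is reached before any group that makes A return 0 early (nonempty, with neither
-- a terminal nor an honor end).
def chantaStops (p : List Int) : Bool :=
  match p.head?, p.getLast? with
  | some a, some b =>
      !(|a| % 10 == 1 || |a| % 10 == 9 || |b| % 10 == 1 || |b| % 10 == 9) &&
      !(|a| / 10 == 4 || |b| / 10 == 4)
  | _, _ => false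

def Pre_chanta (lst : List (List Int)) : Prop :=
  ∀ i < lst.length, lst.getD i [] = [] → ∃ j < i, chantaStops (lst.getD j []) = true
instance (lst : List (List Int)) : Decidable (Pre_chanta lst) := by unfold Pre_chanta; infer_instance
def pvWitness_chanta : List (List Int) := [[1, 2, 3], [9, 9, 9]]

def Spec_chanta (lst : List (List Int)) (out : Int) : Prop := out = chanta_alt lst
instance (lst : List (List Int)) (out : Int) : Decidable (Spec_chanta lst out) := by unfold Spec_chanta; infer_instance

-- ===== CLAIM (what is proved, stated in full; the proofs are below) =====
def Claim_equal_chanta : Prop := ∀ (lst : List (List Int)), Dom_chanta lst → Pre_chanta lst → Spec_chanta lst (chanta lst)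

-- ===== LEMMAS AND PROOFS =====
-- Loop invariant: A's loop classifies exactly as B does, for any accumulator value c.
set_option maxHeartbeats 1600000 in
lemma chanta_loop_eq (lst : List (List Int)) (c : Int) :
    chanta_loop lst c =
      if lst.any (fun p => !hasTerminal p && !hasHonor p) then 0
      else if lst.all hasTerminal then c else 1 := by
  induction lst generalizing c with
  | nil => simp [chanta_loop]
  | cons p rest ih =>
    simp only [chanta_loop, List.any_cons, List.all_cons]
    cases h0 : PySem.List.pyGet? p 0 with
    | none => simp [hasTerminal, hasHonor, h0]
    | some h =>
      cases hl : PySem.List.pyGet? p (-1) with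
      | none => simp [hasTerminal, hasHonor, h0, hl]
      | some l =>
        have hmod : ∀ a : Int, PySem.Int.mod a 10 = a % 10 :=
          fun a => PySem.Int.mod_eq_emod_of_pos (by norm_num)
        have hdiv : ∀ a : Int, PySem.Int.floordiv a 10 = a / 10 :=
          fun a => PySem.Int.floordiv_eq_ediv_of_pos (by norm_num)
        have hT : hasTerminal p =
            (|h| % 10 == 1 || |h| % 10 == 9 || (|l| % 10 == 1 || |l| % 10 == 9)) := by
          simp only [hasTerminal, h0, hl, hmod]
        have hH : hasHonor p = (|h| / 10 == 4 || |l| / 10 == 4) := by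
          simp only [hasHonor, h0, hl, hdiv]
        simp only [hT, hH, hmod, hdiv]
        by_cases e1 : |h| % 10 = 1 <;> by_cases e2 : |h| % 10 = 9 <;>
          by_cases e3 : |l| % 10 = 1 <;> by_cases e4 : |l| % 10 = 9 <;>
          by_cases e5 : |h| / 10 = 4 <;> by_cases e6 : |l| / 10 = 4 <;>
          simp_all

-- ===== VERDICT (by name: the statement is the Claim_ definition above) =====
theorem chanta_spec : Claim_equal_chanta := by
  intro lst _ _
  unfold Spec_chanta chanta chanta_alt
  rw [chanta_loop_eq]
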